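-- pv_equiv track=rewrite | github.com/bob-pham/Project-Cornucopia | tests/AccuracyTest.py | findNumberOfDifferences
-- ===== SOURCE A (Python) =====
-- def findNumberOfDifferences(input1: list[str], input2: list[str]) -> list[int]:
--     """Goes character by character and compares them, if they are not the same it logs the difference
--
--     Args:
--         input1 (list[str]): first list of string to compare
--         input2 (list[str]): second list of string to compare
--
--     Returns:
--         list[int]: list of length 2 => list[0] == #difference, list[1] == #total_characters
--     """
--
--     diff_count = 0
--     total_count = 0
--
--     len_diff = len(input1) - len(input2)
--     shorter = []
--     longer = []
--
--     if (len_diff < 0):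
--         shorter = list(input1)
--         longer = list(input2)
--     else:
--         shorter = list(input2)
--         longer = list(input1)
--
--     len_diff = abs(len_diff)
--
--     for i in range(len(longer)):
--         if (i > len(shorter) - 1):
--             diff_count += 1
--         else:
--             if (longer[i] != shorter[i]):
--                 is_diff = True
--
--                 #Strings may be of differing lengths due to missing characters, searches around for similar characters
--                 for x in range(len_diff):
--                     if (i - x >= 0 and longer[i-x] == shorter[i]):
--                         is_diff = False
--                     elif (i + x < len(shorter) and longer[i] == shorter[i+x]):
--                         is_diff = False
--                 if (is_diff):
--                     diff_count += 1
--         total_count += 1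
--
--     return [diff_count, total_count]
-- ===== SOURCE B (Python) =====
-- def findNumberOfDifferences(input1: list[str], input2: list[str]) -> list[int]:
--     """Sliding-window re-implementation: O(n) with hashmap windows instead of rescanning
--     a length-d neighbourhood for every mismatching position."""
--     if len(input1) < len(input2):
--         shorter, longer = input1, input2
--     else:
--         shorter, longer = input2, input1
--     n = len(shorter)
--     m = len(longer)
--     d = m - n
--
--     def add(c, x):
--         c[x] = c.get(x, 0) + 1
--
--     def rem(c, x):
--         v = c.get(x, 0) - 1
--         if v == 0:
--             del c[x]
--         else:
--             c[x] = v
--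
--     # fwd holds counts of shorter[i+1 .. i+d-1] (clipped to < n); back holds
--     # counts of longer[max(0, i-d+1) .. i-1].  Both are empty whenever d < 2.
--     fwd = {}
--     for j in range(1, d):
--         if j < n:
--             add(fwd, shorter[j])
--     back = {}
--
--     diff = d
--     for i in range(n):
--         if longer[i] != shorter[i] and shorter[i] not in back and longer[i] not in fwd:
--             diff += 1
--         if d >= 2:
--             add(back, longer[i])
--             if i - d + 1 >= 0:
--                 rem(back, longer[i - d + 1])
--             if i + 1 < n:
--                 rem(fwd, shorter[i + 1])
--             if i + d < n:
--                 add(fwd, shorter[i + d])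
--     return [diff, m]
-- ===== Notes on version B (the rewrite author's own statement) =====
-- stated objective: alternative
-- what changed: Replaces A's per-position rescan of a length-d shift neighbourhood (inner loop over range(d) for every mismatch) by two sliding-window dict counters, one over each list, so each position does O(1) membership checks and constant window updates; intended as the O(n) form of A's O(n*d) scan, measured only ~1.3-1.5x on the generated inputs (small d).
import Mathlib
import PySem

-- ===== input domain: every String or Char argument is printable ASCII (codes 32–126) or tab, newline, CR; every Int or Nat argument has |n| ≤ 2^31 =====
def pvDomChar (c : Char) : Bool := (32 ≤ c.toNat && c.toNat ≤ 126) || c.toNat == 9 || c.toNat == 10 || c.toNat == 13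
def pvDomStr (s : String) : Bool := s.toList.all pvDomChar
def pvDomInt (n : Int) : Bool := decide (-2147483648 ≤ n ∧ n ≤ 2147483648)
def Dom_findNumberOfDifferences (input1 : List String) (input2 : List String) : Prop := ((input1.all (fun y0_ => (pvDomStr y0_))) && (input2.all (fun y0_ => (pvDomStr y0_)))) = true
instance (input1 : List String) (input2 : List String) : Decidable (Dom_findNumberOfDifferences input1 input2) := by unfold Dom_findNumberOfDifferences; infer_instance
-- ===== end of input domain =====

-- B replaces A's per-position rescan of a length-d shift neighbourhood by two sliding-window
-- dict counters, one over each list, so each position does O(1) membership checks and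
-- constant window updates (objective: alternative algorithm).

-- all list accesses in both programs are guarded to be in range, so `.getD ""` is exact
def pvGetS (xs : List String) (i : Int) : String := (PySem.List.pyGet? xs i).getD ""

-- ===== PORT A =====
def findNumberOfDifferences (input1 : List String) (input2 : List String) : List Int :=
  let lenDiff : Int := (input1.length : Int) - (input2.length : Int)
  let shorter : List String := if lenDiff < 0 then input1 else input2
  let longer : List String := if lenDiff < 0 then input2 else input1
  let d : Nat := lenDiff.natAbs
  let st : Int × Int := (List.range longer.length).foldl (fun st (i : Nat) =>
    if (i : Int) > (shorter.length : Int) - 1 then (st.1 + 1, st.2 + 1)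
    else if pvGetS longer (i : Int) ≠ pvGetS shorter (i : Int) then
      let isDiff : Bool := (List.range d).foldl (fun b (x : Nat) =>
        if (i : Int) - (x : Int) ≥ 0 ∧ pvGetS longer ((i : Int) - (x : Int)) = pvGetS shorter (i : Int) then false
        else if (i : Int) + (x : Int) < (shorter.length : Int) ∧ pvGetS longer (i : Int) = pvGetS shorter ((i : Int) + (x : Int)) then false
        else b) true
      if isDiff then (st.1 + 1, st.2 + 1) else (st.1, st.2 + 1)
    else (st.1, st.2 + 1)) (0, 0)
  [st.1, st.2]

-- ===== PORT B =====
def pvAdd (c : PySem.Dict String Int) (x : String) : PySem.Dict String Int :=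
  c.insert x (c.getD x 0 + 1)

def pvRem (c : PySem.Dict String Int) (x : String) : PySem.Dict String Int :=
  let v := c.getD x 0 - 1
  if v = 0 then c.erase x else c.insert x v

def findNumberOfDifferences_alt (input1 : List String) (input2 : List String) : List Int :=
  let shorter : List String := if input1.length < input2.length then input1 else input2
  let longer : List String := if input1.length < input2.length then input2 else input1
  let n := shorter.length
  let m := longer.length
  let d := m - n
  let fwd0 := (List.range' 1 (d - 1)).foldl
    (fun c j => if j < n then pvAdd c (pvGetS shorter (j : Int)) else c) PySem.Dict.empty
  let st := (List.range n).foldl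
    (fun (st : Int × PySem.Dict String Int × PySem.Dict String Int) (i : Nat) =>
      let diff := st.1
      let back := st.2.1
      let fwd := st.2.2
      let diff := if pvGetS longer (i : Int) ≠ pvGetS shorter (i : Int) ∧
          back.get? (pvGetS shorter (i : Int)) = none ∧ fwd.get? (pvGetS longer (i : Int)) = none
        then diff + 1 else diff
      if 2 ≤ d then
        let back := pvAdd back (pvGetS longer (i : Int))
        let back := if (i : Int) - (d : Int) + 1 ≥ 0 then pvRem back (pvGetS longer ((i : Int) - (d : Int) + 1)) else back
        let fwd := if i + 1 < n then pvRem fwd (pvGetS shorter ((i : Int) + 1)) else fwd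
        let fwd := if i + d < n then pvAdd fwd (pvGetS shorter ((i : Int) + (d : Int))) else fwd
        (diff, back, fwd)
      else (diff, back, fwd)) ((d : Int), PySem.Dict.empty, fwd0)
  [st.1, (m : Int)]

-- ===== PRECONDITION & SPEC =====
def Spec_findNumberOfDifferences (input1 : List String) (input2 : List String) (out : List Int) : Prop := out = findNumberOfDifferences_alt input1 input2
instance (input1 : List String) (input2 : List String) (out : List Int) : Decidable (Spec_findNumberOfDifferences input1 input2 out) := by unfold Spec_findNumberOfDifferences; infer_instance

-- ===== CLAIM (what is proved, stated in full; the proofs are below) =====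
def Claim_equal_findNumberOfDifferences : Prop := ∀ (input1 : List String) (input2 : List String), Dom_findNumberOfDifferences input1 input2 → Spec_findNumberOfDifferences input1 input2 (findNumberOfDifferences input1 input2)

-- ===== LEMMAS AND PROOFS =====
theorem pvGet?_erase {κ ν : Type} [DecidableEq κ] [BEq κ] [LawfulBEq κ] (d : PySem.Dict κ ν) (k k' : κ) :
    (d.erase k).get? k' = if k' = k then none else d.get? k' := by
  obtain ⟨l⟩ := d
  induction l with
  | nil => simp [PySem.Dict.erase, PySem.Dict.get?]
  | cons p t ih =>
    have hfc : (PySem.Dict.mk (p :: t) : PySem.Dict κ ν).erase k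
        = if p.1 == k then (PySem.Dict.mk t).erase k
          else PySem.Dict.mk (p :: ((PySem.Dict.mk t).erase k).items) := by
      simp only [PySem.Dict.erase, List.filter_cons]
      split_ifs with h <;> simp_all
    rw [hfc]
    by_cases h1 : p.1 = k
    · rw [if_pos (by simp [h1]), ih, PySem.Dict.get?_mk_cons]
      by_cases h2 : k' = k
      · simp [h2]
      · rw [if_neg h2, if_neg h2, if_neg (show ¬ (p.1 == k') = true from by
          simp only [beq_iff_eq, h1]; exact fun h => h2 h.symm)]
    · rw [if_neg (by simp [h1])]
      have : ((PySem.Dict.mk (p :: ((PySem.Dict.mk t).erase k).items) : PySem.Dict κ ν)).get? k'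
          = if p.1 == k' then some p.2 else ((PySem.Dict.mk t : PySem.Dict κ ν).erase k).get? k' := by
        rw [PySem.Dict.get?_mk_cons]
      rw [this, ih, PySem.Dict.get?_mk_cons]
      by_cases h2 : p.1 = k'
      · have hne : ¬ k' = k := fun h => h1 (h ▸ h2)
        rw [if_pos (by simp [h2]), if_neg hne, if_pos (by simp [h2])]
      · split_ifs with h3 h4 <;> simp_all

def pvReprC (c : PySem.Dict String Int) (w : List String) : Prop :=
  ∀ s, c.getD s 0 = (w.count s : Int) ∧ ∀ v, c.get? s = some v → v ≠ 0

theorem pvReprC_empty : pvReprC PySem.Dict.empty [] := by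
  intro s
  constructor
  · simp [pysem]
  · intro v hv; simp [PySem.Dict.get?_empty] at hv

theorem pvReprC_perm {c : PySem.Dict String Int} {w w' : List String} (h : w.Perm w') (hr : pvReprC c w) : pvReprC c w' := by
  intro s
  refine ⟨?_, (hr s).2⟩
  rw [(hr s).1, h.count_eq]

theorem pvReprC_add {c : PySem.Dict String Int} {w : List String} (hr : pvReprC c w) (x : String) :
    pvReprC (pvAdd c x) (x :: w) := by
  intro s
  by_cases hs : s = x
  · subst hs
    constructor
    · rw [pvAdd, PySem.Dict.getD_insert_self, (hr s).1, List.count_cons_self]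
      push_cast; ring
    · intro v hv
      rw [pvAdd, PySem.Dict.get?_insert_self] at hv
      have h1 := (hr s).1
      injection hv with hv'
      omega
  · constructor
    · rw [pvAdd, PySem.Dict.getD_insert_of_ne _ _ _ hs, (hr s).1]
      have hne : (x == s) = false := by simp; exact fun h => hs h.symm
      simp [List.count_cons, hne]
    · intro v hv
      rw [pvAdd, PySem.Dict.get?_insert_of_ne _ _ hs] at hv
      exact (hr s).2 v hv

theorem pvReprC_rem {c : PySem.Dict String Int} {w : List String} (hr : pvReprC c w) {x : String} (hx : x ∈ w) :
    pvReprC (pvRem c x) (w.erase x) := by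
  have hcnt : c.getD x 0 = (w.count x : Int) := (hr x).1
  have hpos : 0 < w.count x := List.count_pos_iff.mpr hx
  intro s
  by_cases hs : s = x
  · subst hs
    by_cases h0 : c.getD s 0 - 1 = 0
    · rw [pvRem]
      simp only [h0, if_true]
      constructor
      · rw [PySem.Dict.getD_eq_get?_getD, pvGet?_erase, if_pos rfl]
        have : w.count s = 1 := by omega
        simp [List.count_erase, this]
      · intro v hv
        rw [pvGet?_erase, if_pos rfl] at hv
        exact absurd hv (by simp)
    · rw [pvRem]
      simp only [h0, if_false]
      constructor
      · rw [PySem.Dict.getD_insert_self]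
        simp [List.count_erase]
        omega
      · intro v hv
        rw [PySem.Dict.get?_insert_self] at hv
        injection hv with hv'
        omega
  · have hne : (x == s) = false := by simp; exact fun h => hs h.symm
    by_cases h0 : c.getD x 0 - 1 = 0
    · rw [pvRem]
      simp only [h0, if_true]
      constructor
      · rw [PySem.Dict.getD_eq_get?_getD, pvGet?_erase, if_neg hs, ← PySem.Dict.getD_eq_get?_getD,
          (hr s).1]
        simp [List.count_erase, hne]
      · intro v hv
        rw [pvGet?_erase, if_neg hs] at hv
        exact (hr s).2 v hv
    · rw [pvRem]
      simp only [h0, if_false]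
      constructor
      · rw [PySem.Dict.getD_insert_of_ne _ _ _ hs, (hr s).1]
        simp [List.count_erase, hne]
      · intro v hv
        rw [PySem.Dict.get?_insert_of_ne _ _ hs] at hv
        exact (hr s).2 v hv

theorem pvReprC_get?_none {c : PySem.Dict String Int} {w : List String} (hr : pvReprC c w) (s : String) :
    (c.get? s = none ↔ ¬ s ∈ w) := by
  have h1 := (hr s).1
  rw [PySem.Dict.getD_eq_get?_getD] at h1
  constructor
  · intro h hmem
    rw [h] at h1
    have := List.count_pos_iff.mpr hmem
    simp at h1
    omega
  · intro h
    have hc : w.count s = 0 := by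
      rw [List.count_eq_zero]; exact h
    cases hg : c.get? s with
    | none => rfl
    | some v =>
      have := (hr s).2 v hg
      rw [hg, hc] at h1
      simp at h1
      exact absurd h1 this

-- A's inner-loop match condition for offset x at position i, as Bools
def pvHit1 (S L : List String) (i x : Nat) : Bool :=
  decide ((i : Int) - (x : Int) ≥ 0 ∧ pvGetS L ((i : Int) - (x : Int)) = pvGetS S (i : Int))
def pvHit2 (S L : List String) (i x : Nat) : Bool :=
  decide ((i : Int) + (x : Int) < (S.length : Int) ∧ pvGetS L (i : Int) = pvGetS S ((i : Int) + (x : Int)))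

def pvPAb (S L : List String) (d i : Nat) : Bool :=
  (List.range d).any (fun x => pvHit1 S L i x || pvHit2 S L i x)

def pvCondAb (S L : List String) (d i : Nat) : Bool :=
  decide (pvGetS L (i : Int) ≠ pvGetS S (i : Int)) && !pvPAb S L d i

def pvFA (S L : List String) (d : Nat) : (Int × Int) → Nat → (Int × Int) := fun st i =>
    if (i : Int) > (S.length : Int) - 1 then (st.1 + 1, st.2 + 1)
    else if pvGetS L (i : Int) ≠ pvGetS S (i : Int) then
      let isDiff : Bool := (List.range d).foldl (fun b (x : Nat) =>
        if (i : Int) - (x : Int) ≥ 0 ∧ pvGetS L ((i : Int) - (x : Int)) = pvGetS S (i : Int) then false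
        else if (i : Int) + (x : Int) < (S.length : Int) ∧ pvGetS L (i : Int) = pvGetS S ((i : Int) + (x : Int)) then false
        else b) true
      if isDiff then (st.1 + 1, st.2 + 1) else (st.1, st.2 + 1)
    else (st.1, st.2 + 1)

theorem pvFoldFlag (l : List Nat) (p q : Nat → Prop) [DecidablePred p] [DecidablePred q] (b : Bool) :
    l.foldl (fun b x => if p x then false else if q x then false else b) b
      = (b && !(l.any (fun x => decide (p x) || decide (q x)))) := by
  induction l generalizing b with
  | nil => simp
  | cons a t ih =>
    rw [List.foldl_cons, ih, List.any_cons]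
    by_cases hp : p a <;> by_cases hq : q a <;> simp [hp, hq]

theorem pvInner (S L : List String) (d i : Nat) :
    ((List.range d).foldl (fun b (x : Nat) =>
        if (i : Int) - (x : Int) ≥ 0 ∧ pvGetS L ((i : Int) - (x : Int)) = pvGetS S (i : Int) then false
        else if (i : Int) + (x : Int) < (S.length : Int) ∧ pvGetS L (i : Int) = pvGetS S ((i : Int) + (x : Int)) then false
        else b) true) = !pvPAb S L d i := by
  rw [pvFoldFlag, pvPAb]
  simp [pvHit1, pvHit2]

theorem pvA_lower (S L : List String) (d : Nat) (l : List Nat) (h : ∀ i ∈ l, i < S.length) (a t : Int) :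
    l.foldl (pvFA S L d) (a, t) = (a + (l.countP (pvCondAb S L d) : Int), t + l.length) := by
  induction l generalizing a t with
  | nil => simp
  | cons i tl ih =>
    have hi : i < S.length := h i (by simp)
    rw [List.foldl_cons]
    have hstep : pvFA S L d (a, t) i
        = if pvCondAb S L d i then (a + 1, t + 1) else (a, t + 1) := by
      rw [pvFA]
      simp only
      rw [if_neg (by push_cast; omega), pvInner]
      by_cases hne : pvGetS L (i : Int) ≠ pvGetS S (i : Int) <;>
        by_cases hpa : pvPAb S L d i = true <;>
        simp [hne, hpa, pvCondAb]
    rw [hstep, List.countP_cons]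
    by_cases hc : pvCondAb S L d i = true <;>
      simp only [hc, if_true, if_false, ih (fun j hj => h j (by simp [hj])), List.length_cons] <;>
      refine Prod.ext ?_ ?_ <;> simp <;> push_cast <;> ring

theorem pvA_upper (S L : List String) (d : Nat) (l : List Nat) (h : ∀ i ∈ l, S.length ≤ i) (a t : Int) :
    l.foldl (pvFA S L d) (a, t) = (a + l.length, t + l.length) := by
  induction l generalizing a t with
  | nil => simp
  | cons i tl ih =>
    have hi : S.length ≤ i := h i (by simp)
    rw [List.foldl_cons]
    have hstep : pvFA S L d (a, t) i = (a + 1, t + 1) := by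
      rw [pvFA]; simp only
      rw [if_pos (by push_cast; omega)]
    rw [hstep, ih (fun j hj => h j (by simp [hj]))]
    refine Prod.ext ?_ ?_ <;> simp <;> push_cast <;> ring

theorem pvA_eval (S L : List String) (h : S.length ≤ L.length) :
    (List.range L.length).foldl (pvFA S L (L.length - S.length)) (0, 0)
      = ((((List.range S.length).countP (pvCondAb S L (L.length - S.length)) : Int) + ((L.length - S.length : Nat) : Int)), (L.length : Int)) := by
  have hsplit : List.range L.length = List.range S.length ++ (List.range (L.length - S.length)).map (fun x => S.length + x) := by
    rw [← List.range_add]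
    congr 1
    omega
  rw [hsplit, List.foldl_append, pvA_lower S L _ _ (fun i hi => List.mem_range.mp hi) 0 0,
    pvA_upper S L _ _ (fun i hi => by obtain ⟨x, _, rfl⟩ := List.mem_map.mp hi; omega)]
  refine Prod.ext ?_ ?_ <;> simp <;> push_cast <;> omega

-- windows
def pvBackIdx (d i : Nat) : List Nat := List.range' (i + 1 - d) (min (d - 1) i)
def pvFwdIdx (d n i : Nat) : List Nat := List.range' (i + 1) (min (i + d) n - (i + 1))
def pvBackW (L : List String) (d i : Nat) : List String := (pvBackIdx d i).map (fun (j : Nat) => pvGetS L (j : Int))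
def pvFwdW (S : List String) (d n i : Nat) : List String := (pvFwdIdx d n i).map (fun (j : Nat) => pvGetS S (j : Int))

def pvCondBb (S L : List String) (d n i : Nat) : Bool :=
  decide (pvGetS L (i : Int) ≠ pvGetS S (i : Int)) &&
  !(List.contains (pvBackW L d i) (pvGetS S (i : Int))) &&
  !(List.contains (pvFwdW S d n i) (pvGetS L (i : Int)))

def pvFB (S L : List String) (n d : Nat) :
    (Int × PySem.Dict String Int × PySem.Dict String Int) → Nat → (Int × PySem.Dict String Int × PySem.Dict String Int) :=
  fun st i =>
      let diff := st.1
      let back := st.2.1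
      let fwd := st.2.2
      let diff := if pvGetS L (i : Int) ≠ pvGetS S (i : Int) ∧
          back.get? (pvGetS S (i : Int)) = none ∧ fwd.get? (pvGetS L (i : Int)) = none
        then diff + 1 else diff
      if 2 ≤ d then
        let back := pvAdd back (pvGetS L (i : Int))
        let back := if (i : Int) - (d : Int) + 1 ≥ 0 then pvRem back (pvGetS L ((i : Int) - (d : Int) + 1)) else back
        let fwd := if i + 1 < n then pvRem fwd (pvGetS S ((i : Int) + 1)) else fwd
        let fwd := if i + d < n then pvAdd fwd (pvGetS S ((i : Int) + (d : Int))) else fwd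
        (diff, back, fwd)
      else (diff, back, fwd)

theorem pvFilter_range' (a k n : Nat) :
    (List.range' a k).filter (fun j => decide (j < n)) = List.range' a (min k (n - a)) := by
  induction k generalizing a with
  | zero => simp
  | succ k ih =>
    rw [List.range'_succ, List.filter_cons]
    by_cases h : a < n
    · rw [if_pos (by simpa using h), ih]
      have h1 : min (k + 1) (n - a) = min k (n - (a + 1)) + 1 := by omega
      rw [h1, List.range'_succ]
    · rw [if_neg (by simpa using h), ih]
      have h1 : min k (n - (a + 1)) = 0 := by omega
      have h2 : min (k + 1) (n - a) = 0 := by omega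
      rw [h1, h2, List.range'_zero, List.range'_zero]

theorem pvFold_add (g : Nat → String) (n : Nat) (l : List Nat) (c : PySem.Dict String Int) (w : List String)
    (h : pvReprC c w) :
    pvReprC (l.foldl (fun c j => if j < n then pvAdd c (g j) else c) c)
      (((l.filter (fun j => decide (j < n))).map g) ++ w) := by
  induction l generalizing c w with
  | nil => simpa using h
  | cons j t ih =>
    rw [List.foldl_cons, List.filter_cons]
    by_cases hj : j < n
    · rw [if_pos hj, if_pos (by simpa using hj)]
      have := ih (pvAdd c (g j)) (g j :: w) (pvReprC_add h (g j))
      refine pvReprC_perm ?_ this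
      simp only [List.map_cons, List.cons_append]
      exact List.perm_middle
    · rw [if_neg hj, if_neg (by simpa using hj)]
      exact ih c w h

theorem pvBackW_nil (L : List String) (d i : Nat) (hd : d ≤ 1) : pvBackW L d i = [] := by
  have h : min (d - 1) i = 0 := by omega
  rw [pvBackW, pvBackIdx, h, List.range'_zero, List.map_nil]

theorem pvBackW_zero (L : List String) (d : Nat) : pvBackW L d 0 = [] := by
  have h : min (d - 1) 0 = 0 := by omega
  rw [pvBackW, pvBackIdx, h, List.range'_zero, List.map_nil]

theorem pvFwdW_nil_d (S : List String) (d n i : Nat) (hd : d ≤ 1) : pvFwdW S d n i = [] := by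
  have h : min (i + d) n - (i + 1) = 0 := by omega
  rw [pvFwdW, pvFwdIdx, h, List.range'_zero, List.map_nil]

theorem pvFwdW_nil_n (S : List String) (d n i : Nat) (hn : n ≤ i + 1) : pvFwdW S d n i = [] := by
  have h : min (i + d) n - (i + 1) = 0 := by omega
  rw [pvFwdW, pvFwdIdx, h, List.range'_zero, List.map_nil]

theorem pvBackIdx_succ_big (d i : Nat) (h2 : 2 ≤ d) (hle : d ≤ i + 1) :
    (i + 1 - d) :: pvBackIdx d (i + 1) = pvBackIdx d i ++ [i] := by
  have e1 : min (d - 1) (i + 1) = d - 1 := by omega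
  have e2 : min (d - 1) i = d - 1 := by omega
  obtain ⟨e, rfl⟩ : ∃ e, d = e + 2 := ⟨d - 2, by omega⟩
  rw [pvBackIdx, pvBackIdx, e1, e2]
  have ea : e + 2 - 1 = e + 1 := by omega
  have eb : i + 1 - (e + 2) + 1 = i + 1 + 1 - (e + 2) := by omega
  have ec : i + 1 - (e + 2) + 1 * (e + 1) = i := by omega
  rw [ea, show e + 1 = e + 1 from rfl]
  calc (i + 1 - (e + 2)) :: List.range' (i + 1 + 1 - (e + 2)) (e + 1)
      = List.range' (i + 1 - (e + 2)) (e + 1 + 1) := by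
        conv_rhs => rw [List.range'_succ]
        rw [eb]
    _ = List.range' (i + 1 - (e + 2)) (e + 1) ++ [i] := by
        conv_lhs => rw [List.range'_concat]
        rw [ec]

theorem pvBackIdx_succ_small (d i : Nat) (hlt : i + 1 < d) :
    pvBackIdx d (i + 1) = pvBackIdx d i ++ [i] := by
  have e1 : min (d - 1) (i + 1) = i + 1 := by omega
  have e2 : min (d - 1) i = i := by omega
  have e3 : i + 1 - d = 0 := by omega
  have e4 : i + 1 + 1 - d = 0 := by omega
  rw [pvBackIdx, pvBackIdx, e1, e2, e3, e4, List.range'_concat]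
  simp

theorem pvFwdIdx_inner_i (d n i : Nat) (h2 : 2 ≤ d) (hin : i + d < n) :
    pvFwdIdx d n i = (i + 1) :: List.range' (i + 2) (d - 2) := by
  have e1 : min (i + d) n - (i + 1) = d - 1 := by omega
  obtain ⟨e, rfl⟩ : ∃ e, d = e + 2 := ⟨d - 2, by omega⟩
  have ea : e + 2 - 1 = e + 1 := by omega
  have eb : e + 2 - 2 = e := by omega
  rw [pvFwdIdx, e1, ea, eb, List.range'_succ]

theorem pvFwdIdx_inner_succ (d n i : Nat) (h2 : 2 ≤ d) (hin : i + d < n) :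
    pvFwdIdx d n (i + 1) = List.range' (i + 2) (d - 2) ++ [i + d] := by
  have e1 : min (i + 1 + d) n - (i + 1 + 1) = d - 1 := by omega
  obtain ⟨e, rfl⟩ : ∃ e, d = e + 2 := ⟨d - 2, by omega⟩
  have ea : e + 2 - 1 = e + 1 := by omega
  have eb : e + 2 - 2 = e := by omega
  have ec : i + 1 + 1 = i + 2 := by omega
  have ed : i + 2 + 1 * e = i + (e + 2) := by omega
  rw [pvFwdIdx, e1, ea, eb, List.range'_concat, ec, ed]

theorem pvFwdIdx_edge (d n i : Nat) (hlt : i + 1 < n) (hge : n ≤ i + d) :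
    pvFwdIdx d n i = (i + 1) :: pvFwdIdx d n (i + 1) := by
  have e1 : min (i + d) n - (i + 1) = (n - (i + 2)) + 1 := by omega
  have e2 : min (i + 1 + d) n - (i + 1 + 1) = n - (i + 2) := by omega
  rw [pvFwdIdx, pvFwdIdx, e1, e2, List.range'_succ]

theorem pvCondBb_iff (S L : List String) (d n i : Nat) :
    pvCondBb S L d n i = true ↔
      (pvGetS L (i : Int) ≠ pvGetS S (i : Int) ∧
       ¬ pvGetS S (i : Int) ∈ pvBackW L d i ∧ ¬ pvGetS L (i : Int) ∈ pvFwdW S d n i) := by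
  rw [pvCondBb]
  simp [and_assoc]

theorem pvFB_step (S L : List String) (n d i : Nat) (a : Int)
    (back fwd : PySem.Dict String Int)
    (hb : pvReprC back (pvBackW L d i)) (hf : pvReprC fwd (pvFwdW S d n i)) (hin : i < n) :
    ∃ back' fwd', pvFB S L n d (a, back, fwd) i
        = (a + (if pvCondBb S L d n i then 1 else 0), back', fwd') ∧
      pvReprC back' (pvBackW L d (i + 1)) ∧ pvReprC fwd' (pvFwdW S d n (i + 1)) := by
  rw [pvFB]
  simp only
  have hcond : (pvGetS L (i : Int) ≠ pvGetS S (i : Int) ∧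
      back.get? (pvGetS S (i : Int)) = none ∧ fwd.get? (pvGetS L (i : Int)) = none)
      ↔ pvCondBb S L d n i = true := by
    rw [pvCondBb_iff, pvReprC_get?_none hb, pvReprC_get?_none hf]
  have hdiff : (if pvGetS L (i : Int) ≠ pvGetS S (i : Int) ∧
      back.get? (pvGetS S (i : Int)) = none ∧ fwd.get? (pvGetS L (i : Int)) = none
      then a + 1 else a) = a + (if pvCondBb S L d n i then 1 else 0) := by
    by_cases hP : pvCondBb S L d n i = true
    · rw [if_pos (hcond.mpr hP), hP]; simp
    · rw [if_neg (fun hp => hP (hcond.mp hp)), if_neg hP]; ring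
  rw [hdiff]
  by_cases hd2 : 2 ≤ d
  · rw [if_pos hd2]
    -- the new back dict and its invariant
    have hb1 : pvReprC (pvAdd back (pvGetS L (i : Int))) (pvGetS L (i : Int) :: pvBackW L d i) :=
      pvReprC_add hb _
    have hback : ∃ back', (if (i : Int) - (d : Int) + 1 ≥ 0
          then pvRem (pvAdd back (pvGetS L (i : Int))) (pvGetS L ((i : Int) - (d : Int) + 1))
          else pvAdd back (pvGetS L (i : Int))) = back'
        ∧ pvReprC back' (pvBackW L d (i + 1)) := by
      by_cases hg : (i : Int) - (d : Int) + 1 ≥ 0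
      · have hle : d ≤ i + 1 := by omega
        have hcast : (i : Int) - (d : Int) + 1 = ((i + 1 - d : Nat) : Int) := by push_cast; omega
        have hlistEq : pvGetS L ((i + 1 - d : Nat) : Int) :: pvBackW L d (i + 1)
            = pvBackW L d i ++ [pvGetS L (i : Int)] := by
          have := congrArg (List.map (fun (j : Nat) => pvGetS L (j : Int))) (pvBackIdx_succ_big d i hd2 hle)
          simpa [pvBackW] using this
        have hperm : (pvGetS L (i : Int) :: pvBackW L d i).Perm
            (pvGetS L ((i + 1 - d : Nat) : Int) :: pvBackW L d (i + 1)) := by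
          rw [hlistEq]
          exact (List.perm_append_singleton _ _).symm
        have hb2 := pvReprC_perm hperm hb1
        have hb3 := pvReprC_rem hb2 (List.mem_cons_self)
        rw [List.erase_cons_head] at hb3
        exact ⟨_, by rw [if_pos hg, hcast], hb3⟩
      · have hlt : i + 1 < d := by omega
        have hlistEq : pvBackW L d (i + 1) = pvBackW L d i ++ [pvGetS L (i : Int)] := by
          have := congrArg (List.map (fun (j : Nat) => pvGetS L (j : Int))) (pvBackIdx_succ_small d i hlt)
          simpa [pvBackW] using this
        refine ⟨_, by rw [if_neg hg], ?_⟩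
        rw [hlistEq]
        exact pvReprC_perm (List.perm_append_singleton _ _).symm hb1
    -- the new fwd dict and its invariant
    have hfwd : ∃ fwd', (if i + d < n
          then pvAdd (if i + 1 < n then pvRem fwd (pvGetS S ((i : Int) + 1)) else fwd)
                 (pvGetS S ((i : Int) + (d : Int)))
          else (if i + 1 < n then pvRem fwd (pvGetS S ((i : Int) + 1)) else fwd)) = fwd'
        ∧ pvReprC fwd' (pvFwdW S d n (i + 1)) := by
      have hcast1 : (i : Int) + 1 = ((i + 1 : Nat) : Int) := by push_cast; ring
      have hcastd : (i : Int) + (d : Int) = ((i + d : Nat) : Int) := by push_cast; ring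
      by_cases hfn2 : i + d < n
      · have hfn1 : i + 1 < n := by omega
        have hWi : pvFwdW S d n i = pvGetS S ((i + 1 : Nat) : Int)
            :: (List.range' (i + 2) (d - 2)).map (fun (j : Nat) => pvGetS S (j : Int)) := by
          have := congrArg (List.map (fun (j : Nat) => pvGetS S (j : Int))) (pvFwdIdx_inner_i d n i hd2 hfn2)
          simpa [pvFwdW] using this
        have hWs : pvFwdW S d n (i + 1)
            = (List.range' (i + 2) (d - 2)).map (fun (j : Nat) => pvGetS S (j : Int))
              ++ [pvGetS S ((i + d : Nat) : Int)] := by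
          have := congrArg (List.map (fun (j : Nat) => pvGetS S (j : Int))) (pvFwdIdx_inner_succ d n i hd2 hfn2)
          simpa [pvFwdW] using this
        have hf1 := pvReprC_rem (pvReprC_perm (hWi.symm ▸ (List.Perm.refl (pvFwdW S d n i))) (hWi ▸ hf)) (List.mem_cons_self)
        rw [List.erase_cons_head] at hf1
        have hf2 := pvReprC_add hf1 (pvGetS S ((i + d : Nat) : Int))
        refine ⟨_, by rw [if_pos hfn2, if_pos hfn1, hcast1, hcastd], ?_⟩
        rw [hWs]
        exact pvReprC_perm (List.perm_append_singleton _ _).symm hf2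
      · by_cases hfn1 : i + 1 < n
        · have hge : n ≤ i + d := by omega
          have hWi : pvFwdW S d n i = pvGetS S ((i + 1 : Nat) : Int) :: pvFwdW S d n (i + 1) := by
            have := congrArg (List.map (fun (j : Nat) => pvGetS S (j : Int))) (pvFwdIdx_edge d n i hfn1 hge)
            simpa [pvFwdW] using this
          have hf1 := pvReprC_rem (pvReprC_perm (hWi.symm ▸ (List.Perm.refl (pvFwdW S d n i))) (hWi ▸ hf)) (List.mem_cons_self)
          rw [List.erase_cons_head] at hf1
          exact ⟨_, by rw [if_neg hfn2, if_pos hfn1, hcast1], hf1⟩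
        · have hge : n ≤ i + 1 := by omega
          refine ⟨_, by rw [if_neg hfn2, if_neg hfn1], ?_⟩
          rw [pvFwdW_nil_n S d n (i + 1) (by omega), ← pvFwdW_nil_n S d n i hge]
          exact hf
    obtain ⟨back', hbeq, hb'⟩ := hback
    obtain ⟨fwd', hfeq, hf'⟩ := hfwd
    exact ⟨back', fwd', by rw [hbeq, hfeq], hb', hf'⟩
  · rw [if_neg hd2]
    have hble : d ≤ 1 := by omega
    refine ⟨back, fwd, rfl, ?_, ?_⟩
    · rw [pvBackW_nil L d (i + 1) hble, ← pvBackW_nil L d i hble]; exact hb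
    · rw [pvFwdW_nil_d S d n (i + 1) hble, ← pvFwdW_nil_d S d n i hble]; exact hf

theorem pvB_loop (S L : List String) (n d : Nat) (i : Nat) (hi : i ≤ n)
    (f0 : PySem.Dict String Int) (hf0 : pvReprC f0 (pvFwdW S d n 0)) :
    ∃ back fwd, (List.range i).foldl (pvFB S L n d) ((d : Int), PySem.Dict.empty, f0)
        = ((d : Int) + ((List.range i).countP (pvCondBb S L d n) : Int), back, fwd)
      ∧ pvReprC back (pvBackW L d i) ∧ pvReprC fwd (pvFwdW S d n i) := by
  induction i with
  | zero =>
    refine ⟨PySem.Dict.empty, f0, by simp, ?_, hf0⟩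
    rw [pvBackW_zero]
    exact pvReprC_empty
  | succ i ih =>
    obtain ⟨back, fwd, heq, hb, hf⟩ := ih (by omega)
    obtain ⟨back', fwd', hstep, hb', hf'⟩ :=
      pvFB_step S L n d i ((d : Int) + ((List.range i).countP (pvCondBb S L d n) : Int)) back fwd hb hf (by omega)
    refine ⟨back', fwd', ?_, hb', hf'⟩
    rw [List.range_succ, List.foldl_append, heq, List.foldl_cons, List.foldl_nil, hstep,
      List.countP_append]
    congr 1
    simp only [List.countP_cons, List.countP_nil]
    by_cases hc : pvCondBb S L d n i = true <;> simp [hc] <;> push_cast <;> ring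

theorem pvFwd0 (S : List String) (n d : Nat) (hn : n = S.length) :
    pvReprC ((List.range' 1 (d - 1)).foldl
        (fun c j => if j < n then pvAdd c (pvGetS S (j : Int)) else c) PySem.Dict.empty)
      (pvFwdW S d n 0) := by
  have h := pvFold_add (fun (j : Nat) => pvGetS S (j : Int)) n (List.range' 1 (d - 1))
    PySem.Dict.empty [] pvReprC_empty
  rw [pvFilter_range'] at h
  have he : min (d - 1) (n - 1) = min (0 + d) n - (0 + 1) := by omega
  rw [he] at h
  simpa [pvFwdW, pvFwdIdx] using h

theorem pvPAb_iff (S L : List String) (d n i : Nat) (hn : n = S.length) (hi : i < n)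
    (hne : pvGetS L (i : Int) ≠ pvGetS S (i : Int)) :
    pvPAb S L d i = true ↔
      (pvGetS S (i : Int) ∈ pvBackW L d i ∨ pvGetS L (i : Int) ∈ pvFwdW S d n i) := by
  rw [pvPAb, List.any_eq_true]
  constructor
  · rintro ⟨x, hxmem, hor⟩
    have hx : x < d := List.mem_range.mp hxmem
    rcases Bool.or_eq_true_iff.mp hor with h1 | h2
    · obtain ⟨hge, heq⟩ := of_decide_eq_true h1
      have hxle : x ≤ i := by omega
      have hx0 : x ≠ 0 := by
        rintro rfl
        apply hne
        simpa using heq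
      left
      rw [pvBackW, List.mem_map]
      refine ⟨i - x, ?_, ?_⟩
      · rw [pvBackIdx, List.mem_range'_1]
        omega
      · rw [show ((i - x : Nat) : Int) = (i : Int) - (x : Int) by omega]
        exact heq
    · obtain ⟨hlt, heq⟩ := of_decide_eq_true h2
      have hx0 : x ≠ 0 := by
        rintro rfl
        apply hne
        simpa using heq
      right
      rw [pvFwdW, List.mem_map]
      refine ⟨i + x, ?_, ?_⟩
      · rw [pvFwdIdx, List.mem_range'_1]
        omega
      · rw [show ((i + x : Nat) : Int) = (i : Int) + (x : Int) by omega]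
        exact heq.symm
  · rintro (hmem | hmem)
    · obtain ⟨j, hjmem, hjeq⟩ := List.mem_map.mp hmem
      rw [pvBackIdx, List.mem_range'_1] at hjmem
      have hj : j ≤ i ∧ i - j < d := by omega
      refine ⟨i - j, List.mem_range.mpr hj.2, ?_⟩
      apply Bool.or_eq_true_iff.mpr
      left
      apply decide_eq_true
      constructor
      · omega
      · rw [show (i : Int) - ((i - j : Nat) : Int) = ((j : Nat) : Int) by omega]
        exact hjeq
    · obtain ⟨j, hjmem, hjeq⟩ := List.mem_map.mp hmem
      rw [pvFwdIdx, List.mem_range'_1] at hjmem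
      have hj : i < j ∧ j - i < d ∧ j < n := by omega
      refine ⟨j - i, List.mem_range.mpr hj.2.1, ?_⟩
      apply Bool.or_eq_true_iff.mpr
      right
      apply decide_eq_true
      constructor
      · rw [show (i : Int) + ((j - i : Nat) : Int) = ((j : Nat) : Int) by omega]
        omega
      · rw [show (i : Int) + ((j - i : Nat) : Int) = ((j : Nat) : Int) by omega]
        exact hjeq.symm

theorem pvCond_eq (S L : List String) (d n i : Nat) (hn : n = S.length) (hi : i < n) :
    pvCondBb S L d n i = pvCondAb S L d i := by
  by_cases hne : pvGetS L (i : Int) ≠ pvGetS S (i : Int)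
  · by_cases hpa : pvPAb S L d i = true
    · have hB : pvCondBb S L d n i = false := by
        rw [Bool.eq_false_iff]
        intro hBt
        obtain ⟨_, hnb, hnf⟩ := (pvCondBb_iff S L d n i).mp hBt
        rcases (pvPAb_iff S L d n i hn hi hne).mp hpa with h | h
        · exact hnb h
        · exact hnf h
      rw [hB, pvCondAb, hpa]
      simp
    · have hnmem : ¬ (pvGetS S (i : Int) ∈ pvBackW L d i ∨ pvGetS L (i : Int) ∈ pvFwdW S d n i) :=
        fun h => hpa ((pvPAb_iff S L d n i hn hi hne).mpr h)
      push_neg at hnmem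
      have hB : pvCondBb S L d n i = true :=
        (pvCondBb_iff S L d n i).mpr ⟨hne, hnmem.1, hnmem.2⟩
      rw [hB, pvCondAb]
      simp [hne, hpa]
  · have hB : pvCondBb S L d n i = false := by
      rw [Bool.eq_false_iff]
      intro hBt
      exact hne ((pvCondBb_iff S L d n i).mp hBt).1
    rw [hB, pvCondAb]
    simp [not_not.mp hne]

theorem pvEnd (S L : List String) (h : S.length ≤ L.length) :
    (let st := (List.range L.length).foldl (pvFA S L (L.length - S.length)) (0, 0);
      ([st.1, st.2] : List Int))
      = (let st := (List.range S.length).foldl (pvFB S L S.length (L.length - S.length))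
          (((L.length - S.length : Nat) : Int), PySem.Dict.empty,
            (List.range' 1 (L.length - S.length - 1)).foldl
              (fun c j => if j < S.length then pvAdd c (pvGetS S (j : Int)) else c) PySem.Dict.empty);
         [st.1, (L.length : Int)]) := by
  obtain ⟨back, fwd, heq, _, _⟩ := pvB_loop S L S.length (L.length - S.length) S.length le_rfl _
    (pvFwd0 S S.length (L.length - S.length) rfl)
  simp only
  rw [pvA_eval S L h, heq]
  have hcnt : (List.range S.length).countP (pvCondBb S L (L.length - S.length) S.length)
      = (List.range S.length).countP (pvCondAb S L (L.length - S.length)) :=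
    List.countP_congr (fun i hi => by
      rw [pvCond_eq S L (L.length - S.length) S.length i rfl (List.mem_range.mp hi)])
  rw [hcnt]
  simp [add_comm]

theorem pvMain (input1 input2 : List String) :
    findNumberOfDifferences input1 input2 = findNumberOfDifferences_alt input1 input2 := by
  by_cases h12 : input1.length < input2.length
  · rw [findNumberOfDifferences, findNumberOfDifferences_alt]
    simp only [if_pos (show (input1.length : Int) - (input2.length : Int) < 0 by omega),
      if_pos h12,
      show ((input1.length : Int) - (input2.length : Int)).natAbs = input2.length - input1.length by omega]
    show (let st := (List.range input2.length).foldl (pvFA input1 input2 (input2.length - input1.length)) (0, 0);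
      ([st.1, st.2] : List Int))
      = (let st := (List.range input1.length).foldl (pvFB input1 input2 input1.length (input2.length - input1.length))
          (((input2.length - input1.length : Nat) : Int), PySem.Dict.empty,
            (List.range' 1 (input2.length - input1.length - 1)).foldl
              (fun c j => if j < input1.length then pvAdd c (pvGetS input1 (j : Int)) else c) PySem.Dict.empty);
         [st.1, (input2.length : Int)])
    exact pvEnd input1 input2 (by omega)
  · rw [findNumberOfDifferences, findNumberOfDifferences_alt]
    simp only [if_neg (show ¬ ((input1.length : Int) - (input2.length : Int) < 0) by omega),
      if_neg h12,
      show ((input1.length : Int) - (input2.length : Int)).natAbs = input1.length - input2.length by omega]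
    show (let st := (List.range input1.length).foldl (pvFA input2 input1 (input1.length - input2.length)) (0, 0);
      ([st.1, st.2] : List Int))
      = (let st := (List.range input2.length).foldl (pvFB input2 input1 input2.length (input1.length - input2.length))
          (((input1.length - input2.length : Nat) : Int), PySem.Dict.empty,
            (List.range' 1 (input1.length - input2.length - 1)).foldl
              (fun c j => if j < input2.length then pvAdd c (pvGetS input2 (j : Int)) else c) PySem.Dict.empty);
         [st.1, (input1.length : Int)])
    exact pvEnd input2 input1 (by omega)


-- ===== VERDICT (by name: the statement is the Claim_ definition above) =====
theorem findNumberOfDifferences_spec : Claim_equal_findNumberOfDifferences := by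
  intro input1 input2 _
  unfold Spec_findNumberOfDifferences
  exact pvMain input1 input2
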